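-- pv_equiv track=rewrite | github.com/lenoirgn/MyBegginerWorkPython | Sans_Poo/coding_week.py | grille_croix
-- ===== SOURCE A (Python) =====
-- def  grille_croix(entier:int)->list[list[str]]:
--     """ Retourne une grille carrée de taille impair `entier` avec une croix centrale en '+'.
--
--     Précondition : entier est impaire
--     Exemple(s) :
--     $$$ grille_croix(3)
--     [['*', '+', '*'], ['+', '+', '+'], ['*', '+', '*']]
--     $$$ grille_croix(5)
--     [['*', '*', '+', '*', '*'], ['*', '*', '+', '*', '*'], ['+', '+', '+', '+', '+'], ['*', '*', '+', '*', '*'], ['*', '*', '+', '*', '*']]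
--     $$$ grille_croix(7)
--     [['*', '*', '*', '+', '*', '*', '*'], ['*', '*', '*', '+', '*', '*', '*'], ['*', '*', '*', '+', '*', '*', '*'], ['+', '+', '+', '+', '+', '+', '+'], ['*', '*', '*', '+', '*', '*', '*'], ['*', '*', '*', '+', '*', '*', '*'], ['*', '*', '*', '+', '*', '*', '*']]
--
--     """
--     grille=[]
--     centrale=entier//2
--     for i in range(entier):
--         grille.append([])
--         if i !=centrale:
--             for j in range(entier):
--                 if j==centrale:
--                     grille[i].append('+')
--                 else:
--                     grille[i].append('*')
--
--         else:
--             for j in range(entier):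
--                 grille[i].append('+')
--     return grille
-- ===== SOURCE B (Python) =====
-- def grille_croix(entier: int) -> list[list[str]]:
--     grid = [['*'] * entier for _ in range(entier)]
--     center = entier // 2
--     for i in range(entier):
--         grid[i][center] = '+'
--         grid[center][i] = '+'
--     return grid
-- ===== Notes on version B (the rewrite author's own statement) =====
-- stated objective: simpler
-- what changed: B fills the whole grid with '*' up front and then stamps the central row and column with '+' in one loop, replacing A's per-cell if/else branching inside nested loops.
import Mathlib
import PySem

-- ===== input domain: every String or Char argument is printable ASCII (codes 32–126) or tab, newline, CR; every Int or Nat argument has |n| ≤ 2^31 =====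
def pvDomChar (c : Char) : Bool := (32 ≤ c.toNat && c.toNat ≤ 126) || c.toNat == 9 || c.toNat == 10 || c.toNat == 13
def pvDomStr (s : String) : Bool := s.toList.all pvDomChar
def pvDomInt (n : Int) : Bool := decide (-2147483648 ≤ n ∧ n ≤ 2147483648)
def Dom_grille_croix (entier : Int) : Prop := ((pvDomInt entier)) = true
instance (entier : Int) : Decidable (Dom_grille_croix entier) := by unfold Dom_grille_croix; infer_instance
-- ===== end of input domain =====

-- B fills the grid with '*' and then stamps the central row and column in one loop,
-- replacing A's per-cell if/else branching inside nested loops (objective: simpler).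

-- ===== PORT A =====
-- grille[i].append(x) is ported by hand as set-at-i of (row at i ++ [x]); exact since i is always in range here.
def grille_croix (entier : Int) : List (List String) :=
  let centrale := PySem.Int.floordiv entier 2
  (PySem.List.pyRange 0 entier 1).foldl (fun grille i =>
    let grille := grille ++ [([] : List String)]
    if i ≠ centrale then
      (PySem.List.pyRange 0 entier 1).foldl (fun g j =>
        if j = centrale then
          PySem.List.pySetD g i (PySem.List.pyGetD g i [] ++ ["+"])
        else
          PySem.List.pySetD g i (PySem.List.pyGetD g i [] ++ ["*"])) grille
    else
      (PySem.List.pyRange 0 entier 1).foldl (fun g _ =>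
        PySem.List.pySetD g i (PySem.List.pyGetD g i [] ++ ["+"])) grille
  ) []

-- ===== PORT B =====
def grille_croix_alt (entier : Int) : List (List String) :=
  let grid := (PySem.List.pyRange 0 entier 1).map (fun _ => PySem.List.pyRepeat ["*"] entier)
  let center := PySem.Int.floordiv entier 2
  (PySem.List.pyRange 0 entier 1).foldl (fun g i =>
    let g := PySem.List.pySetD g i (PySem.List.pySetD (PySem.List.pyGetD g i []) center "+")
    PySem.List.pySetD g center (PySem.List.pySetD (PySem.List.pyGetD g center []) i "+")) grid

-- ===== PRECONDITION & SPEC =====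
def Spec_grille_croix (entier : Int) (out : List (List String)) : Prop := out = grille_croix_alt entier
instance (entier : Int) (out : List (List String)) : Decidable (Spec_grille_croix entier out) := by unfold Spec_grille_croix; infer_instance

-- ===== CLAIM (what is proved, stated in full; the proofs are below) =====
def Claim_equal_grille_croix : Prop := ∀ (entier : Int), Dom_grille_croix entier → Spec_grille_croix entier (grille_croix entier)

-- ===== LEMMAS AND PROOFS =====

-- the common target: row `c` is all '+', every other row is '+' at column c, '*' elsewhere
def pvRow (n c : Nat) : List String := (List.range n).map (fun j => if j = c then "+" else "*")
def pvTgt (n c : Nat) : List (List String) :=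
  (List.range n).map (fun i => if i = c then List.replicate n "+" else pvRow n c)

lemma set_map_range {α : Type} (f : Nat → α) (n k : Nat) (x : α) :
    ((List.range n).map f).set k x = (List.range n).map (fun i => if i = k then x else f i) := by
  apply List.ext_getElem
  · simp
  · intro i h1 h2
    rw [List.getElem_set]
    simp only [List.getElem_map, List.getElem_range]
    by_cases h : k = i
    · subst h; simp
    · rw [if_neg h, if_neg (by omega)]

lemma map_range_congr {α : Type} {n : Nat} {f g : Nat → α} (h : ∀ i, i < n → f i = g i) :
    (List.range n).map f = (List.range n).map g := by
  apply List.map_congr_left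
  intro i hi
  exact h i (List.mem_range.mp hi)

-- appending one cell at a time to the last row
lemma append_row (cell : Int → String) :
    ∀ (js : List Int) (P : List (List String)) (r : List String),
      js.foldl (fun g j =>
        PySem.List.pySetD g (P.length : Int) (PySem.List.pyGetD g (P.length : Int) [] ++ [cell j]))
        (P ++ [r]) = P ++ [r ++ js.map cell] := by
  intro js
  induction js with
  | nil => intro P r; simp
  | cons j js ih =>
    intro P r
    have hget : PySem.List.pyGetD (P ++ [r]) (P.length : Int) ([] : List String) = r := by
      simp [PySem.List.pyGetD, PySem.List.pyIdx?]
    have hset : (P ++ [r]).set P.length (r ++ [cell j]) = P ++ [r ++ [cell j]] := by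
      rw [List.set_append_right _ _ (le_refl _)]
      simp
    rw [List.foldl_cons]
    have hstep : PySem.List.pySetD (P ++ [r]) (P.length : Int)
        (PySem.List.pyGetD (P ++ [r]) (P.length : Int) [] ++ [cell j]) = P ++ [r ++ [cell j]] := by
      rw [PySem.List.pySetD_natCast, hget, hset]
    rw [hstep, ih]
    simp


lemma map_range_const {α : Type} (n : Nat) (a : α) :
    (List.range n).map (fun _ => a) = List.replicate n a := by
  simp [List.map_const']

lemma pyGetD_map_range {α : Type} (f : Nat → α) (n k : Nat) (hk : k < n) (d : α) :
    PySem.List.pyGetD ((List.range n).map f) (k : Int) d = f k := by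
  rw [PySem.List.pyGetD_natCast]
  simp [List.getD, hk]

-- the A-side loop builds exactly the target, row by row
lemma A_fold (n c k : Nat) :
    ((List.range k).map Int.ofNat).foldl (fun grille i =>
      if i ≠ (c : Int) then
        ((List.range n).map Int.ofNat).foldl (fun g j =>
          if j = (c : Int) then
            PySem.List.pySetD g i (PySem.List.pyGetD g i [] ++ ["+"])
          else
            PySem.List.pySetD g i (PySem.List.pyGetD g i [] ++ ["*"])) (grille ++ [([] : List String)])
      else
        ((List.range n).map Int.ofNat).foldl (fun g _ =>
          PySem.List.pySetD g i (PySem.List.pyGetD g i [] ++ ["+"])) (grille ++ [([] : List String)])) []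
    = (List.range k).map (fun i => if i = c then List.replicate n "+" else pvRow n c) := by
  induction k with
  | zero => simp
  | succ k ih =>
    rw [List.range_succ, List.map_append, List.foldl_append, ih]
    simp only [List.map_cons, List.map_nil, List.foldl_cons, List.foldl_nil, Int.ofNat_eq_natCast]
    set acc := (List.range k).map (fun i => if i = c then List.replicate n "+" else pvRow n c) with hacc
    have hlen : acc.length = k := by simp [hacc]
    by_cases hkc : k = c
    · rw [if_neg (by simp [hkc])]
      have h2 := append_row (fun _ => "+") ((List.range n).map Int.ofNat) acc []
      rw [hlen] at h2
      have hplus : ((List.range n).map Int.ofNat).map (fun _ => "+") = List.replicate n "+" := by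
        rw [List.map_map]
        exact map_range_const n "+"
      rw [h2, hplus]
      simp [hkc]
      rw [hacc, hkc]
    · rw [if_pos (by simp [hkc])]
      have hfun : (fun (g : List (List String)) (j : Int) =>
          if j = (c : Int) then
            PySem.List.pySetD g ((k : Nat) : Int) (PySem.List.pyGetD g ((k : Nat) : Int) [] ++ ["+"])
          else
            PySem.List.pySetD g ((k : Nat) : Int) (PySem.List.pyGetD g ((k : Nat) : Int) [] ++ ["*"]))
          = (fun g j => PySem.List.pySetD g ((k : Nat) : Int)
              (PySem.List.pyGetD g ((k : Nat) : Int) [] ++ [if j = (c : Int) then "+" else "*"])) := by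
        funext g j
        by_cases h : j = (c : Int) <;> simp [h]
      rw [hfun]
      have h2 := append_row (fun j => if j = (c : Int) then "+" else "*") ((List.range n).map Int.ofNat) acc []
      rw [hlen] at h2
      have hrow : ((List.range n).map Int.ofNat).map (fun j => if j = (c : Int) then "+" else "*") = pvRow n c := by
        rw [List.map_map]
        apply map_range_congr
        intro i _
        simp [Int.natCast_inj]
      rw [h2, hrow]
      simp [hkc]
      exact hacc

-- stamping a column-k '+' into a partly-stamped central row
lemma hstar_lemma (n c : Nat) : (List.replicate n "*").set c "+" = pvRow n c := by
  rw [← map_range_const n "*", set_map_range]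
  rfl

lemma hrowc_lemma (n k m : Nat) (hk : k < n) :
    ((List.range n).map (fun j => if j < m then "+" else "*")).set k "+"
      = (List.range n).map (fun j => if j < m ∨ j = k then "+" else "*") := by
  rw [set_map_range]
  apply map_range_congr
  intro j _
  by_cases h1 : j = k <;> by_cases h2 : j < m <;> simp [h1, h2]

-- the B-side loop: after k stamps, row c is '+' up to column k, rows below k are stamped
lemma B_fold (n c : Nat) (hc : c < n) : ∀ k, k ≤ n →
    ((List.range k).map Int.ofNat).foldl (fun g i =>
      PySem.List.pySetD
        (PySem.List.pySetD g i (PySem.List.pySetD (PySem.List.pyGetD g i []) (c : Int) "+"))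
        (c : Int)
        (PySem.List.pySetD
          (PySem.List.pyGetD
            (PySem.List.pySetD g i (PySem.List.pySetD (PySem.List.pyGetD g i []) (c : Int) "+"))
            (c : Int) []) i "+"))
      ((List.range n).map (fun _ => List.replicate n "*"))
    = (List.range n).map (fun i =>
        if i = c then (List.range n).map (fun j => if j < k then "+" else "*")
        else if i < k then pvRow n c else List.replicate n "*") := by
  intro k
  induction k with
  | zero =>
    intro _
    simp only [List.range_zero, List.map_nil, List.foldl_nil]
    apply map_range_congr
    intro i _
    by_cases h : i = c <;> simp [h, map_range_const]
  | succ k ih =>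
    intro hk
    have hk1 : k < n := by omega
    rw [List.range_succ, List.map_append, List.foldl_append, ih (by omega)]
    simp only [List.map_cons, List.map_nil, List.foldl_cons, List.foldl_nil,
      Int.ofNat_eq_natCast, PySem.List.pySetD_natCast]
    by_cases hkc : k = c
    · subst hkc
      rw [pyGetD_map_range _ _ _ hk1]
      rw [if_pos rfl, hrowc_lemma n k k hk1]
      have he1 : (List.range n).map (fun j => if j < k ∨ j = k then "+" else "*")
          = (List.range n).map (fun j => if j < k + 1 then "+" else "*") := by
        apply map_range_congr; intro j _
        by_cases h : j < k + 1 <;> simp [h] <;> omega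
      rw [he1, set_map_range, pyGetD_map_range _ _ _ hk1, if_pos rfl,
        hrowc_lemma n k (k + 1) hk1]
      have he2 : (List.range n).map (fun j => if j < k + 1 ∨ j = k then "+" else "*")
          = (List.range n).map (fun j => if j < k + 1 then "+" else "*") := by
        apply map_range_congr; intro j _
        by_cases h : j < k + 1 <;> simp [h] <;> omega
      rw [he2, set_map_range]
      apply map_range_congr
      intro i _
      by_cases h1 : i = k
      · subst h1; simp
      · simp only [if_neg h1]
        by_cases h2 : i < k <;> by_cases h3 : i < k + 1 <;> simp [h2, h3] <;> omega
    · rw [pyGetD_map_range _ _ _ hk1, if_neg hkc, if_neg (lt_irrefl k), hstar_lemma,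
        set_map_range, pyGetD_map_range _ _ _ hc, if_neg (Ne.symm hkc), if_pos rfl,
        hrowc_lemma n k k hk1]
      have he1 : (List.range n).map (fun j => if j < k ∨ j = k then "+" else "*")
          = (List.range n).map (fun j => if j < k + 1 then "+" else "*") := by
        apply map_range_congr; intro j _
        by_cases h : j < k + 1 <;> simp [h] <;> omega
      rw [he1, set_map_range]
      apply map_range_congr
      intro i _
      by_cases h1 : i = c
      · subst h1; simp [Ne.symm hkc]
      · simp only [if_neg h1]
        by_cases h2 : i = k
        · simp [h2, Nat.lt_succ_self]
        · by_cases h3 : i < k <;> by_cases h4 : i < k + 1 <;> simp [h2, h3, h4] <;> omega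

theorem A_eq_tgt (n : Nat) : grille_croix (n : Int) = pvTgt n (n / 2) := by
  have hfl : PySem.Int.floordiv (n : Int) 2 = ((n / 2 : Nat) : Int) := by
    exact_mod_cast PySem.Int.floordiv_natCast n 2
  unfold grille_croix
  rw [PySem.List.pyRange_zero_natCast, hfl]
  exact A_fold n (n / 2) n

theorem B_eq_tgt (n : Nat) : grille_croix_alt (n : Int) = pvTgt n (n / 2) := by
  by_cases hn : n = 0
  · subst hn
    rfl
  · have hc : n / 2 < n := by omega
    have hfl : PySem.Int.floordiv (n : Int) 2 = ((n / 2 : Nat) : Int) := by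
      exact_mod_cast PySem.Int.floordiv_natCast n 2
    unfold grille_croix_alt
    rw [PySem.List.pyRange_zero_natCast, hfl, PySem.List.pyRepeat_singleton, Int.toNat_natCast,
      List.map_map]
    have h := B_fold n (n / 2) hc n (le_refl n)
    have h2 : (List.range n).map (fun i =>
        if i = n / 2 then (List.range n).map (fun j => if j < n then "+" else "*")
        else if i < n then pvRow n (n / 2) else List.replicate n "*") = pvTgt n (n / 2) := by
      apply map_range_congr
      intro i hi
      by_cases h1 : i = n / 2
      · subst h1
        simp only [if_pos rfl]
        rw [show ((List.range n).map fun j => if j < n then "+" else "*") = List.replicate n "+" by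
          rw [← map_range_const n "+"]; apply map_range_congr; intro j hj; simp [hj]]
        rfl
      · simp [pvTgt, h1, hi]
    exact h.trans h2

theorem neg_nil (entier : Int) (h : entier < 0) :
    grille_croix entier = [] ∧ grille_croix_alt entier = [] := by
  unfold grille_croix grille_croix_alt
  rw [PySem.List.pyRange_one_eq_nil (by omega)]
  simp

-- ===== VERDICT (by name: the statement is the Claim_ definition above) =====
theorem grille_croix_spec : Claim_equal_grille_croix := by
  intro entier _
  unfold Spec_grille_croix
  rcases lt_or_ge entier 0 with h | h
  · rcases neg_nil entier h with ⟨h1, h2⟩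
    rw [h1, h2]
  · obtain ⟨n, rfl⟩ := Int.eq_ofNat_of_zero_le h
    rw [A_eq_tgt, B_eq_tgt]
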